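-- pv_equiv track=rewrite | github.com/YounesB-McGill/uml-grader | heuristic_grader.py | get_n_assoc_with_mult
-- ===== SOURCE A (Python) =====
-- from typing import Dict, List, Tuple
--
-- def get_association_multiplicities(umple_text: str, bidirectional=False) -> List[str]:
--     result = []
--     lines = umple_text.splitlines()
--     for line in lines:
--         if "--" in line:
--             line = "".join(c for c in line if not c.isalpha())
--             lhs, rhs = line.split("--")
--             result.append(f"{lhs.split()[-1]}--{rhs.split()[0]}")
--             if bidirectional:
--                 result.append(f"{rhs.split()[0]}--{lhs.split()[-1]}")
--     return result
--
-- def get_n_assoc_with_mult(submission: str, ideal_mult: List[str], max_assoc: int):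
--     result = 0
--
--     submission_assocs = get_association_multiplicities(submission)
--
--     for assoc in ideal_mult:
--         if assoc in submission_assocs:
--             result += 1
--             submission_assocs.remove(assoc)  # prevent double counting
--
--     return min(max_assoc, result)
-- ===== SOURCE B (Python) =====
-- from typing import Dict, List, Tuple
--
-- def get_n_assoc_with_mult(submission: str, ideal_mult: List[str], max_assoc: int):
--     # Single inlined extraction pass, then a capped multiset intersection over the
--     # distinct ideal multiplicities (no membership-test-and-remove consume loop).
--     subs = []
--     for line in submission.splitlines():
--         if "--" in line:
--             kept = "".join(c for c in line if not c.isalpha())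
--             lhs, rhs = kept.split("--")
--             subs.append(lhs.split()[-1] + "--" + rhs.split()[0])
--     matched = sum(min(ideal_mult.count(k), subs.count(k)) for k in dict.fromkeys(ideal_mult))
--     return min(max_assoc, matched)
-- ===== Notes on version B (the rewrite author's own statement) =====
-- stated objective: alternative
-- what changed: A's per-ideal membership-test-and-remove consume loop over the extracted submission list is replaced by a capped multiset intersection: one pass over the distinct ideal keys summing min(ideal count, submission count); the extraction is inlined as a single accumulating pass instead of a helper returning per-line pieces.
import Mathlib
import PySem

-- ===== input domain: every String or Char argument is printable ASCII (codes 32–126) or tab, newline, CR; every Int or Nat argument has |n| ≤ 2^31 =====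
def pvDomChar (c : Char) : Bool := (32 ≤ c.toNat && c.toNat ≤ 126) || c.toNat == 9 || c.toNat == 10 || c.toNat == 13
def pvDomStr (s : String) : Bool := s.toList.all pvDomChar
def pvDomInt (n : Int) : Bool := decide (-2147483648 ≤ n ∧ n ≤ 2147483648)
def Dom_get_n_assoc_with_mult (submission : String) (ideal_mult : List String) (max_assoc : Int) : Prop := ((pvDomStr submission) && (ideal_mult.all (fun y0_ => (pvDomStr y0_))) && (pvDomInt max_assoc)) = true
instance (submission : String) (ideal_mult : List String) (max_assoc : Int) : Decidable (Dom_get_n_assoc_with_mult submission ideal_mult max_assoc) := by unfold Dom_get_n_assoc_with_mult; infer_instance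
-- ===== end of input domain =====

-- B replaces A's per-ideal membership-test-and-remove consume loop by a capped multiset
-- intersection over the distinct ideal keys, with the extraction inlined as one
-- accumulating pass (alternative decomposition); same values on Pre_.

-- ===== PORT A =====
-- helper get_association_multiplicities (A calls it with bidirectional=False, the default;
-- the parameter is kept). Option: none exactly where the Python helper raises (the
-- "lhs, rhs = …" unpack ValueError, split()[-1] / split()[0] IndexError); those inputs
-- are excluded by Pre_ below.
def pvAssocLine? (line : String) (bidirectional : Bool) : Option (List String) :=
  let cs := line.toList.filter (fun c => !PySem.Chars.isalpha c)
  match PySem.Chars.splitOn cs ['-', '-'] with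
  | [lhs, rhs] =>
    match PySem.List.pyGet? (PySem.Chars.split₀ lhs) (-1), PySem.List.pyGet? (PySem.Chars.split₀ rhs) 0 with
    | some l, some r =>
        if bidirectional then
          some [String.ofList (l ++ ['-', '-'] ++ r), String.ofList (r ++ ['-', '-'] ++ l)]
        else
          some [String.ofList (l ++ ['-', '-'] ++ r)]
    | _, _ => none
  | _ => none

def get_association_multiplicities? (umple_text : String) (bidirectional : Bool) : Option (List String) :=
  (((PySem.Str.splitlines umple_text).filter (fun l => PySem.Str.isIn "--" l)).mapM
    (fun l => pvAssocLine? l bidirectional)).map List.flatten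

def get_n_assoc_with_mult (submission : String) (ideal_mult : List String) (max_assoc : Int) : Int :=
  match get_association_multiplicities? submission false with
  | none => 0  -- the Python raises here; excluded by Pre_
  | some submission_assocs =>
    let st := ideal_mult.foldl
      (fun (st : Int × List String) assoc =>
        if assoc ∈ st.2 then (st.1 + 1, st.2.erase assoc) else st)
      (0, submission_assocs)
    min max_assoc st.1

-- ===== PORT B =====
-- B's inlined extraction loop: one fold over the lines accumulating the subs list
-- (none exactly where B's Python raises, i.e. the same unpack/IndexError lines).
def pvAltSubs? (submission : String) : Option (List String) :=
  (PySem.Str.splitlines submission).foldl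
    (fun acc line =>
      acc.bind (fun subs =>
        if PySem.Str.isIn "--" line then
          match PySem.Chars.splitOn (line.toList.filter (fun c => !PySem.Chars.isalpha c)) ['-', '-'] with
          | [lhs, rhs] =>
            ((PySem.Chars.split₀ lhs).getLast?).bind (fun l =>
              ((PySem.Chars.split₀ rhs).head?).map (fun r =>
                subs ++ [String.ofList (l ++ ['-', '-'] ++ r)]))
          | _ => none
        else some subs))
    (some [])

def get_n_assoc_with_mult_alt (submission : String) (ideal_mult : List String) (max_assoc : Int) : Int :=
  match pvAltSubs? submission with
  | none => 0  -- the Python raises here; excluded by Pre_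
  | some subs =>
    let matched := ((PySem.List.dedup ideal_mult).map
      (fun k => min ((ideal_mult.count k : Int)) ((subs.count k : Int)))).sum
    min max_assoc matched

-- ===== PRECONDITION & SPEC =====
-- Pre_ excludes exactly the submissions on which A (and B, which raises identically) raises:
-- a line containing "--" whose de-alphabetized text does not split on "--" into exactly
-- two halves (ValueError), or whose half has no whitespace token (IndexError).
def Pre_get_n_assoc_with_mult (submission : String) (ideal_mult : List String) (max_assoc : Int) : Prop :=
  ∀ line ∈ PySem.Str.splitlines submission, PySem.Str.isIn "--" line = true →
    (PySem.Chars.splitOn (line.toList.filter (fun c => !PySem.Chars.isalpha c)) ['-', '-']).length = 2 ∧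
    PySem.Chars.split₀ ((PySem.Chars.splitOn (line.toList.filter (fun c => !PySem.Chars.isalpha c)) ['-', '-']).head!) ≠ [] ∧
    PySem.Chars.split₀ ((PySem.Chars.splitOn (line.toList.filter (fun c => !PySem.Chars.isalpha c)) ['-', '-']).getLast!) ≠ []
instance (submission : String) (ideal_mult : List String) (max_assoc : Int) : Decidable (Pre_get_n_assoc_with_mult submission ideal_mult max_assoc) := by unfold Pre_get_n_assoc_with_mult; infer_instance

def pvWitness_get_n_assoc_with_mult : String × List String × Int := ("A a 1 -- * b B;\nno assoc", ["1--*", "2--2"], 5)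

def Spec_get_n_assoc_with_mult (submission : String) (ideal_mult : List String) (max_assoc : Int) (out : Int) : Prop := out = get_n_assoc_with_mult_alt submission ideal_mult max_assoc
instance (submission : String) (ideal_mult : List String) (max_assoc : Int) (out : Int) : Decidable (Spec_get_n_assoc_with_mult submission ideal_mult max_assoc out) := by unfold Spec_get_n_assoc_with_mult; infer_instance

-- ===== CLAIM =====
def Claim_equal_get_n_assoc_with_mult : Prop := ∀ (submission : String) (ideal_mult : List String) (max_assoc : Int), Dom_get_n_assoc_with_mult submission ideal_mult max_assoc → Pre_get_n_assoc_with_mult submission ideal_mult max_assoc → Spec_get_n_assoc_with_mult submission ideal_mult max_assoc (get_n_assoc_with_mult submission ideal_mult max_assoc)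

-- ===== LEMMAS AND PROOFS =====

-- proof-only name for B's per-line fold step (identical to the lambda in pvAltSubs?)
def pvStep (acc : Option (List String)) (line : String) : Option (List String) :=
  acc.bind (fun subs =>
    if PySem.Str.isIn "--" line then
      match PySem.Chars.splitOn (line.toList.filter (fun c => !PySem.Chars.isalpha c)) ['-', '-'] with
      | [lhs, rhs] =>
        ((PySem.Chars.split₀ lhs).getLast?).bind (fun l =>
          ((PySem.Chars.split₀ rhs).head?).map (fun r =>
            subs ++ [String.ofList (l ++ ['-', '-'] ++ r)]))
      | _ => none
    else some subs)

lemma pvAlt_foldStep (s : String) :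
    pvAltSubs? s = (PySem.Str.splitlines s).foldl pvStep (some []) := rfl

lemma pvStep_none (line : String) : pvStep none line = none := rfl

-- B's step on one line equals A's per-line helper appended to the accumulator
lemma pvStep_some (subs : List String) (line : String) :
    pvStep (some subs) line =
      if PySem.Str.isIn "--" line then (pvAssocLine? line false).map (fun xs => subs ++ xs)
      else some subs := by
  unfold pvStep pvAssocLine?
  simp only [Option.bind_some]
  by_cases h : PySem.Str.isIn "--" line = true
  · rw [if_pos h, if_pos h]
    cases hs : PySem.Chars.splitOn (line.toList.filter (fun c => !PySem.Chars.isalpha c)) ['-', '-'] with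
    | nil => simp
    | cons lhs t =>
      match t with
      | [] => simp
      | rhs :: r2 :: rr => simp
      | [rhs] =>
        simp only
        rw [← PySem.List.pyGet?_neg_one]
        cases hL : PySem.List.pyGet? (PySem.Chars.split₀ lhs) (-1) with
        | none => simp
        | some l =>
          cases hr : PySem.Chars.split₀ rhs with
          | nil => simp [PySem.List.pyGet?]
          | cons r rs => simp [PySem.List.pyGet?, PySem.List.pyIdx?]
  · rw [if_neg h, if_neg h]

lemma pvFold_none (lines : List String) : lines.foldl pvStep none = none := by
  induction lines with
  | nil => rfl
  | cons a t ih => simpa [pvStep_none] using ih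

-- B's whole extraction fold equals A's filter+mapM, with an accumulator in front
lemma pvFold_some (lines : List String) : ∀ (acc : List String),
    lines.foldl pvStep (some acc)
      = (((lines.filter (fun l => PySem.Str.isIn "--" l)).mapM (fun l => pvAssocLine? l false)).map
          (fun xs => acc ++ xs.flatten)) := by
  induction lines with
  | nil => intro acc; simp
  | cons line t ih =>
    intro acc
    rw [List.foldl_cons, pvStep_some, List.filter_cons]
    by_cases hl : PySem.Str.isIn "--" line = true
    · rw [if_pos hl, if_pos hl, List.mapM_cons]
      cases ha : pvAssocLine? line false with
      | none => simp [pvFold_none]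
      | some xs =>
        simp only [Option.map_some, ih, List.append_assoc]
        cases (t.filter (fun l => PySem.Str.isIn "--" l)).mapM (fun l => pvAssocLine? l false) with
        | none => rfl
        | some ys => simp
    · rw [if_neg hl, if_neg hl, ih]

lemma pvExtract_eq (submission : String) :
    pvAltSubs? submission = get_association_multiplicities? submission false := by
  rw [pvAlt_foldStep, pvFold_some]
  unfold get_association_multiplicities?
  simp

-- the common mathematical value: per-key capped intersection size over ideal's support
def pvF (ideal subs : List String) : Int :=
  ∑ k ∈ ideal.toFinset, min ((ideal.count k : Int)) ((subs.count k : Int))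

lemma pvAlt_sum (ideal subs : List String) :
    ((PySem.List.dedup ideal).map
      (fun k => min ((ideal.count k : Int)) ((subs.count k : Int)))).sum = pvF ideal subs := by
  rw [← List.sum_toFinset _ (by simp)]
  have : (PySem.List.dedup ideal).toFinset = ideal.toFinset := by
    ext x; simp
  rw [this, pvF]

lemma pvF_cons_not_mem (a : String) (t subs : List String) (h : a ∉ subs) :
    pvF (a :: t) subs = pvF t subs := by
  have hc : subs.count a = 0 := List.count_eq_zero.mpr h
  unfold pvF
  rw [List.toFinset_cons]
  by_cases ht : a ∈ t
  · rw [Finset.insert_eq_self.mpr (List.mem_toFinset.mpr ht)]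
    apply Finset.sum_congr rfl
    intro k hk
    by_cases hk' : k = a
    · subst hk'; rw [hc]; push_cast; omega
    · rw [List.count_cons_of_ne (Ne.symm hk')]
  · rw [Finset.sum_insert (by simp [ht])]
    have hz : min (((a :: t).count a : Int)) ((subs.count a : Int)) = 0 := by
      rw [hc]; push_cast; omega
    rw [hz, zero_add]
    apply Finset.sum_congr rfl
    intro k hk
    rw [List.count_cons_of_ne (by rintro rfl; exact ht (List.mem_toFinset.mp hk))]

lemma pvF_cons_mem (a : String) (t subs : List String) (h : a ∈ subs) :
    pvF (a :: t) subs = 1 + pvF t (subs.erase a) := by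
  have hc : 1 ≤ subs.count a := List.one_le_count_iff.mpr h
  unfold pvF
  rw [List.toFinset_cons]
  have hins : insert a t.toFinset = insert a (t.toFinset.erase a) := by
    ext x; by_cases hx : x = a <;> simp [hx]
  rw [hins, Finset.sum_insert (Finset.notMem_erase a _)]
  have hside : ∀ k ∈ t.toFinset.erase a,
      min (((a :: t).count k : Int)) ((subs.count k : Int))
        = min ((t.count k : Int)) (((subs.erase a).count k : Int)) := by
    intro k hk
    have hka : k ≠ a := Finset.ne_of_mem_erase hk
    rw [List.count_cons_of_ne (Ne.symm hka), List.count_erase_of_ne hka]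
  by_cases ht : a ∈ t
  · have hmem : a ∈ t.toFinset := List.mem_toFinset.mpr ht
    rw [← Finset.add_sum_erase _ _ hmem]
    rw [List.count_cons_self, List.count_erase_self]
    have key : min (((t.count a + 1 : Nat) : Int)) ((subs.count a : Int))
        = 1 + min ((t.count a : Int)) (((subs.count a - 1 : Nat) : Int)) := by
      push_cast [hc]; omega
    rw [key, Finset.sum_congr rfl hside]
    ring
  · have hmem : a ∉ t.toFinset := by simp [ht]
    rw [Finset.erase_eq_of_notMem hmem] at hside ⊢
    rw [Finset.sum_congr rfl hside]
    have h0 : t.count a = 0 := List.count_eq_zero.mpr ht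
    rw [List.count_cons_self, h0]
    have key : min (((0 + 1 : Nat) : Int)) ((subs.count a : Int)) = 1 := by
      push_cast [hc]; omega
    rw [key]

lemma pvLoop (ideal : List String) : ∀ (subs : List String) (r : Int),
    (ideal.foldl
      (fun (st : Int × List String) assoc =>
        if assoc ∈ st.2 then (st.1 + 1, st.2.erase assoc) else st)
      (r, subs)).1 = r + pvF ideal subs := by
  induction ideal with
  | nil => intro subs r; simp [pvF]
  | cons a t ih =>
    intro subs r
    by_cases h : a ∈ subs
    · simp only [List.foldl_cons, if_pos h, ih, pvF_cons_mem a t subs h]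
      ring
    · simp only [List.foldl_cons, if_neg h, ih, pvF_cons_not_mem a t subs h]

-- ===== VERDICT =====
theorem get_n_assoc_with_mult_spec : Claim_equal_get_n_assoc_with_mult := by
  intro submission ideal_mult max_assoc _hdom _hpre
  unfold Spec_get_n_assoc_with_mult get_n_assoc_with_mult get_n_assoc_with_mult_alt
  rw [pvExtract_eq]
  cases h : get_association_multiplicities? submission false with
  | none => rfl
  | some subs =>
    simp only [pvAlt_sum, pvLoop, zero_add]
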